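-- pv_equiv track=rewrite | github.com/patwantsv5/adventofcode | 2015/day5.py | check_bad_letters
-- ===== SOURCE A (Python) =====
-- def check_bad_letters(string):
--     forbidden = ["ab", "cd", "pq", "xy"]
--     length = len(string)
--     for idx, char in enumerate(string):
--         if idx + 1 == length:
--             return True
--         if char + string[idx + 1] in forbidden:
--             # contains two in a row
--             return False
--     return True
-- ===== SOURCE B (Python) =====
-- def check_bad_letters(string):
--     return not any(pair in string for pair in ["ab", "cd", "pq", "xy"])
-- ===== Notes on version B (the rewrite author's own statement) =====
-- stated objective: idiomatic
-- what changed: B iterates over the four forbidden pairs and does a substring-membership test for each, instead of A's position-by-position scan that forms each adjacent pair by hand.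
import Mathlib
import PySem

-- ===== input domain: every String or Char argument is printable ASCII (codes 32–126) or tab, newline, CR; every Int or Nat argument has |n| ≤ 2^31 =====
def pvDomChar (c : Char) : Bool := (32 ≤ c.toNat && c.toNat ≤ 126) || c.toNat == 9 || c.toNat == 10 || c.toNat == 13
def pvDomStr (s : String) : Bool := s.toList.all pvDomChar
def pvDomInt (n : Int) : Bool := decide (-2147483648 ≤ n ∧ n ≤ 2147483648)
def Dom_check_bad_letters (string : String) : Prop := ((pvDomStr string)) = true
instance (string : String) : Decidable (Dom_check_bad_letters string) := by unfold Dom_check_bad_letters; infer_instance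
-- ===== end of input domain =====

-- B tests each of the four forbidden pairs with a substring-membership search instead of A's indexed scan over adjacent positions (idiomatic; same cost).


-- ===== PORT A =====
-- the forbidden list, as lists of chars ('char + string[idx+1] in forbidden')
def pvForbiddenA : List (List Char) := [['a','b'], ['c','d'], ['p','q'], ['x','y']]

-- the 'for idx, char in enumerate(string)' loop with its two early returns
def checkLoopA (string : String) (length : Int) : List (Int × Char) → Bool
  | [] => true                                   -- loop exhausted: 'return True'
  | (idx, char) :: rest =>
      if idx + 1 = length then true              -- 'if idx + 1 == length: return True'
      else
        match PySem.Str.pyGet? string (idx + 1) with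
        | none => true                           -- unreachable: idx + 1 < length here
        | some c2 =>
            if pvForbiddenA.contains [char, c2] then false   -- 'return False'
            else checkLoopA string length rest

def check_bad_letters (string : String) : Bool :=
  checkLoopA string (PySem.Str.len string) (PySem.List.enumerate string.toList)

-- ===== PORT B =====
-- 'not any(pair in string for pair in ["ab", "cd", "pq", "xy"])'
def check_bad_letters_alt (string : String) : Bool :=
  !(["ab", "cd", "pq", "xy"].any (fun pair => PySem.Str.isIn pair string))

-- ===== PRECONDITION & SPEC =====
def Spec_check_bad_letters (string : String) (out : Bool) : Prop := out = check_bad_letters_alt string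
instance (string : String) (out : Bool) : Decidable (Spec_check_bad_letters string out) := by unfold Spec_check_bad_letters; infer_instance

-- ===== CLAIM (what is proved, stated in full; the proofs are below) =====
def Claim_equal_check_bad_letters : Prop := ∀ (string : String), Dom_check_bad_letters string → Spec_check_bad_letters string (check_bad_letters string)

-- ===== LEMMAS AND PROOFS =====
-- a plain adjacent-pair scan, the common shape both ports are reduced to
def simpleScan : List Char → Bool
  | a :: b :: t => if pvForbiddenA.contains [a, b] then false else simpleScan (b :: t)
  | _ => true

-- 'some forbidden pair occurs as an infix'
def Pbad (l : List Char) : Prop :=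
  ['a','b'] <:+: l ∨ ['c','d'] <:+: l ∨ ['p','q'] <:+: l ∨ ['x','y'] <:+: l

theorem infix_pair (x y a b : Char) (t : List Char) :
    ([x, y] <:+: a :: b :: t) ↔ ((a = x ∧ b = y) ∨ [x, y] <:+: b :: t) := by
  rw [List.infix_cons_iff]
  constructor
  · rintro (h | h)
    · left
      rw [List.cons_prefix_cons] at h
      obtain ⟨hx, h⟩ := h
      rw [List.cons_prefix_cons] at h
      exact ⟨hx.symm, h.1.symm⟩
    · right; exact h
  · rintro (⟨hx, hy⟩ | h)
    · left; subst hx; subst hy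
      exact List.cons_prefix_cons.2 ⟨rfl, List.cons_prefix_cons.2 ⟨rfl, List.nil_prefix⟩⟩
    · right; exact h

theorem not_infix_pair_short (x y : Char) (l : List Char) (h : l.length ≤ 1) :
    ¬ ([x, y] <:+: l) := by
  intro hinf
  have := hinf.length_le
  simp at this
  omega

theorem not_Pbad_short (l : List Char) (h : l.length ≤ 1) : ¬ Pbad l := by
  rintro (hh | hh | hh | hh) <;> exact not_infix_pair_short _ _ _ h hh

theorem Pbad_cons (a b : Char) (t : List Char) :
    Pbad (a :: b :: t) ↔ (pvForbiddenA.contains [a, b] = true ∨ Pbad (b :: t)) := by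
  unfold Pbad
  rw [infix_pair 'a' 'b' a b t, infix_pair 'c' 'd' a b t,
      infix_pair 'p' 'q' a b t, infix_pair 'x' 'y' a b t]
  have hc : (pvForbiddenA.contains [a, b] = true) ↔
      ((a = 'a' ∧ b = 'b') ∨ (a = 'c' ∧ b = 'd') ∨ (a = 'p' ∧ b = 'q') ∨ (a = 'x' ∧ b = 'y')) := by
    simp [pvForbiddenA]
  rw [hc]
  constructor
  · rintro (h | h | h | h)
    · rcases h with h | h
      · exact Or.inl (Or.inl h)
      · exact Or.inr (Or.inl h)
    · rcases h with h | h
      · exact Or.inl (Or.inr (Or.inl h))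
      · exact Or.inr (Or.inr (Or.inl h))
    · rcases h with h | h
      · exact Or.inl (Or.inr (Or.inr (Or.inl h)))
      · exact Or.inr (Or.inr (Or.inr (Or.inl h)))
    · rcases h with h | h
      · exact Or.inl (Or.inr (Or.inr (Or.inr h)))
      · exact Or.inr (Or.inr (Or.inr (Or.inr h)))
  · rintro (h | h)
    · rcases h with h | h | h | h
      · exact Or.inl (Or.inl h)
      · exact Or.inr (Or.inl (Or.inl h))
      · exact Or.inr (Or.inr (Or.inl (Or.inl h)))
      · exact Or.inr (Or.inr (Or.inr (Or.inl h)))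
    · rcases h with h | h | h | h
      · exact Or.inl (Or.inr h)
      · exact Or.inr (Or.inl (Or.inr h))
      · exact Or.inr (Or.inr (Or.inl (Or.inr h)))
      · exact Or.inr (Or.inr (Or.inr (Or.inr h)))

theorem simpleScan_iff (l : List Char) : simpleScan l = true ↔ ¬ Pbad l := by
  induction l with
  | nil => simpa [simpleScan] using not_Pbad_short [] (by simp)
  | cons a t ih =>
      cases t with
      | nil => simpa [simpleScan] using not_Pbad_short [a] (by simp)
      | cons b t' =>
          rw [simpleScan, Pbad_cons]
          by_cases hc : pvForbiddenA.contains [a, b] = true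
          · rw [if_pos hc]
            constructor
            · intro h; exact absurd h (by simp)
            · intro h; exact absurd (Or.inl hc) h
          · rw [if_neg hc, ih]
            constructor
            · intro h
              rintro (hP | hQ)
              · exact hc hP
              · exact h hQ
            · intro h hQ
              exact h (Or.inr hQ)

theorem alt_iff (s : String) : check_bad_letters_alt s = true ↔ ¬ Pbad s.toList := by
  have hab : ("ab" : String).toList = ['a','b'] := rfl
  have hcd : ("cd" : String).toList = ['c','d'] := rfl
  have hpq : ("pq" : String).toList = ['p','q'] := rfl
  have hxy : ("xy" : String).toList = ['x','y'] := rfl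
  simp [check_bad_letters_alt, Pbad, hab, hcd, hpq, hxy,
        PySem.Chars.isIn_eq_false_iff]

theorem loopA_eq (s : String) (m : List Char) (k : Nat) (hm : s.toList.drop k = m) :
    checkLoopA s (PySem.Str.len s) (PySem.List.enumerate m (k : Int)) = simpleScan m := by
  induction m generalizing k with
  | nil => simp [checkLoopA, simpleScan, PySem.List.enumerate_nil]
  | cons c rest ih =>
      rw [PySem.List.enumerate_cons, checkLoopA]
      have hlenN : (PySem.Str.len s) = (s.toList.length : Int) := by
        simp [PySem.Str.len_eq]
      have hk : k < s.toList.length := by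
        by_contra hk
        simp only [not_lt] at hk
        rw [List.drop_eq_nil_of_le hk] at hm
        exact List.cons_ne_nil _ _ hm.symm
      have hlen : s.toList.length = k + 1 + rest.length := by
        have := congrArg List.length hm
        rw [List.length_drop] at this
        simp only [List.length_cons] at this
        omega
      rw [hlenN]
      by_cases hend : k + 1 = s.toList.length
      · have hrest : rest = [] := List.eq_nil_of_length_eq_zero (by omega)
        subst hrest
        have : ((k : Int) + 1 = (s.toList.length : Int)) := by exact_mod_cast congrArg Nat.cast hend
        simp [this, simpleScan]
      · have hendI : ¬ ((k : Int) + 1 = (s.toList.length : Int)) := by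
          intro h
          exact hend (by exact_mod_cast h)
        rw [if_neg hendI]
        obtain ⟨c2, rest', hr⟩ : ∃ c2 rest', rest = c2 :: rest' := by
          cases rest with
          | nil =>
              exfalso; apply hend
              simp only [List.length_nil] at hlen
              omega
          | cons x xs => exact ⟨x, xs, rfl⟩
        have hm' : s.toList.drop (k + 1) = rest := by
          have : s.toList.drop (k + 1) = (s.toList.drop k).drop 1 := by
            rw [List.drop_drop]
          rw [this, hm]
          simp
        have hget : PySem.Str.pyGet? s ((k : Int) + 1) = some c2 := by
          have hcast : ((k : Int) + 1) = ((k + 1 : Nat) : Int) := by push_cast; ring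
          rw [hcast, PySem.Str.pyGet?_natCast]
          have h0 : (List.drop (k + 1) s.toList)[0]? = s.toList[k + 1]? := by
            rw [List.getElem?_drop]
          rw [← h0, hm', hr]
          simp
        rw [hget]
        have hrec := ih (k + 1) hm'
        rw [hlenN] at hrec
        push_cast at hrec ⊢
        rw [hrec, hr]
        conv_rhs => rw [simpleScan]

-- ===== VERDICT (by name: the statement is the Claim_ definition above) =====
theorem check_bad_letters_spec : Claim_equal_check_bad_letters := by
  intro s _
  unfold Spec_check_bad_letters
  have hA : check_bad_letters s = simpleScan s.toList := by
    simpa [check_bad_letters] using loopA_eq s s.toList 0 (by simp)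
  rw [hA, Bool.eq_iff_iff, simpleScan_iff, alt_iff]
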